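-- pv_equiv track=rewrite | github.com/YashB63/GFG-Daily-Questions | Day 548/Queries on Strings/queries_on_strings.py | SolveQueris
-- ===== SOURCE A (Python) =====
-- def SolveQueris(str, Query):
--     results = []
--
--     for query in Query:
--         l = query[0] - 1
--         r = query[1] - 1
--         unique_chars = set()
--
--         for i in range(l, r + 1):
--             unique_chars.add(str[i])
--
--         results.append(len(unique_chars))
--
--     return results
-- ===== SOURCE B (Python) =====
-- def _prefix(s, c):
--     # prefix counts: out[j] = number of occurrences of c in s[:j]
--     out = [0]
--     t = 0
--     for ch in s:
--         if ch == c: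
--             t += 1
--         out.append(t)
--     return out
--
--
-- def SolveQueris(str, Query):
--     chars = []
--     seen = set()
--     for ch in str:
--         if ch not in seen:
--             seen.add(ch)
--             chars.append(ch)
--     pref = {c: _prefix(str, c) for c in chars}
--     results = []
--     for q in Query:
--         l = q[0] - 1
--         r = q[1] - 1
--         if l > r:
--             results.append(0)
--         else:
--             results.append(sum(1 for c in chars if pref[c][r + 1] - pref[c][l] > 0))
--     return results
-- ===== Notes on version B (the rewrite author's own statement) =====
-- stated objective: alternative
-- what changed: Instead of rescanning the query substring with a set for every query, B precomputes one per-character prefix-count array per distinct character and answers each query by counting the characters whose prefix-count difference over the range is positive.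
-- outside the precondition, e.g. on SolveQueris('ab', [[0, 1]]): A returns [2], B returns [0]
import Mathlib
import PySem

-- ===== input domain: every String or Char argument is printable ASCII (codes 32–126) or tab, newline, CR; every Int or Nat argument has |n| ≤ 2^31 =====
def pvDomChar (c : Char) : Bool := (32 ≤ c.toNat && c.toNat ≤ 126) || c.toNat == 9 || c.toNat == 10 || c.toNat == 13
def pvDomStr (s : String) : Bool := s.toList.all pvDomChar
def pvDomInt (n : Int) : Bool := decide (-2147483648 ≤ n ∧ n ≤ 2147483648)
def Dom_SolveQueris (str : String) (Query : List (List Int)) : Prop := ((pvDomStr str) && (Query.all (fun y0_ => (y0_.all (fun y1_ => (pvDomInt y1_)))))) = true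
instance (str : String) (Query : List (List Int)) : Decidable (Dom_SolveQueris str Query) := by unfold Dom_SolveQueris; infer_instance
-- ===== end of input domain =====

-- Alternative algorithm: B answers each query from precomputed per-character prefix-count
-- arrays instead of A's per-query substring rescan; the proved claim is return-value equivalence.


-- ===== PORT A =====
def SolveQueris (str : String) (Query : List (List Int)) : List Int :=
  Query.foldl (fun results query =>
    let l := PySem.List.pyGetD query 0 0 - 1
    let r := PySem.List.pyGetD query 1 0 - 1
    let uniqueChars := (PySem.List.pyRange l (r + 1) 1).foldl
      (fun (u : PySem.Set Char) i => PySem.Set.add u (PySem.List.pyGetD str.toList i ' '))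
      PySem.Set.empty
    results ++ [PySem.Set.len uniqueChars]) []

-- ===== PORT B =====
-- helper _prefix(s, c): prefix counts of character c
def pvPrefix (s : List Char) (c : Char) : List Int :=
  (s.foldl (fun (st : List Int × Int) ch =>
    let t := if ch = c then st.2 + 1 else st.2
    (st.1 ++ [t], t)) ([0], 0)).1

-- the 'seen'/'chars' first-occurrence loop of B
def pvCharsLoop (s : List Char) : PySem.Set Char × List Char :=
  s.foldl (fun (st : PySem.Set Char × List Char) ch =>
    if PySem.Set.contains st.1 ch then st else (PySem.Set.add st.1 ch, st.2 ++ [ch]))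
    (PySem.Set.empty, [])

def SolveQueris_alt (str : String) (Query : List (List Int)) : List Int :=
  let s := str.toList
  let chars := (pvCharsLoop s).2
  let pref : PySem.Dict Char (List Int) :=
    chars.foldl (fun d c => d.insert c (pvPrefix s c)) PySem.Dict.empty
  Query.foldl (fun results q =>
    let l := PySem.List.pyGetD q 0 0 - 1
    let r := PySem.List.pyGetD q 1 0 - 1
    if l > r then
      results ++ [0]
    else
      results ++ [((chars.countP (fun c =>
        decide (0 < PySem.List.pyGetD (PySem.Dict.getD pref c []) (r + 1) 0
                  - PySem.List.pyGetD (PySem.Dict.getD pref c []) l 0))) : Int)]) []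

-- ===== PRECONDITION & SPEC =====
-- Pre_ excludes (a) queries shorter than 2 (A raises IndexError on query[1]) and nonempty ranges
-- reaching outside the string (A raises IndexError on str[i]), and (b) nonempty ranges whose 1-based
-- start is non-positive: there A silently reads characters from the string's TAIL through Python's
-- negative-index wraparound — an out-of-range query for which neither program's value is specified.
def Pre_SolveQueris (str : String) (Query : List (List Int)) : Prop :=
  ∀ q ∈ Query, 2 ≤ q.length ∧
    (PySem.List.pyGetD q 1 0 < PySem.List.pyGetD q 0 0 ∨
      (1 ≤ PySem.List.pyGetD q 0 0 ∧ PySem.List.pyGetD q 1 0 ≤ (str.toList.length : Int)))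
instance (str : String) (Query : List (List Int)) : Decidable (Pre_SolveQueris str Query) := by
  unfold Pre_SolveQueris; infer_instance

def pvWitness_SolveQueris : String × List (List Int) := ("abca", [[1, 3], [2, 2], [3, 1]])

def Spec_SolveQueris (str : String) (Query : List (List Int)) (out : List Int) : Prop := out = SolveQueris_alt str Query
instance (str : String) (Query : List (List Int)) (out : List Int) : Decidable (Spec_SolveQueris str Query out) := by unfold Spec_SolveQueris; infer_instance

-- ===== CLAIM (what is proved, stated in full; the proofs are below) =====
def Claim_equal_SolveQueris : Prop := ∀ (str : String) (Query : List (List Int)), Dom_SolveQueris str Query → Pre_SolveQueris str Query → Spec_SolveQueris str Query (SolveQueris str Query)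

-- ===== LEMMAS AND PROOFS =====

theorem pvPrefix_aux (c : Char) (s : List Char) : ∀ (acc : List Int) (t : Int),
    (s.foldl (fun (st : List Int × Int) ch =>
      let t := if ch = c then st.2 + 1 else st.2
      (st.1 ++ [t], t)) (acc, t)).1
    = acc ++ (List.range s.length).map (fun j => t + ((s.take (j + 1)).count c : Int)) := by
  induction s with
  | nil => intro acc t; simp
  | cons ch s ih =>
    intro acc t
    simp only [List.foldl_cons]
    rw [ih]
    simp only [List.length_cons, List.range_succ_eq_map, List.map_cons, List.map_map]
    simp only [List.take_succ_cons, List.count_cons]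
    rw [List.append_assoc]
    congr 1
    simp only [List.singleton_append]
    congr 1
    · simp [List.take_zero]
      by_cases h : ch = c <;> simp [h]
    · congr 1
      funext j
      by_cases h : ch = c
      · simp [h, Function.comp]; omega
      · simp [h, Function.comp]

theorem pvPrefix_eq (s : List Char) (c : Char) :
    pvPrefix s c = (List.range (s.length + 1)).map (fun j => ((s.take j).count c : Int)) := by
  rw [pvPrefix, pvPrefix_aux]
  simp [List.range_succ_eq_map, Function.comp]

theorem pref_getD_aux (s : List Char) (chars : List Char) : ∀ (d : PySem.Dict Char (List Int)) (c : Char),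
    PySem.Dict.getD (chars.foldl (fun d c => d.insert c (pvPrefix s c)) d) c []
      = if c ∈ chars then pvPrefix s c else PySem.Dict.getD d c [] := by
  induction chars with
  | nil => intro d c; simp
  | cons c0 chars ih =>
    intro d c
    simp only [List.foldl_cons]
    rw [ih]
    by_cases hm : c ∈ chars
    · simp [hm]
    · by_cases he : c = c0
      · simp [he]
      · simp [hm, he, PySem.Dict.getD_insert]

theorem map_range_getD (s : List Char) (a b : Int) (d : Char) (h0 : 0 ≤ a) (hb : b ≤ (s.length : Int)) :
    (PySem.List.pyRange a b 1).map (fun i => PySem.List.pyGetD s i d)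
      = (s.take b.toNat).drop a.toNat := by
  by_cases hab : b ≤ a
  · rw [PySem.List.pyRange_one_eq_nil hab, List.map_nil]
    refine (List.drop_eq_nil_iff.2 ?_).symm
    simp only [List.length_take]
    omega
  · rw [not_le] at hab
    rw [PySem.List.pyRange_one_cons hab, List.map_cons]
    have hlt : a.toNat < (s.take b.toNat).length := by
      simp only [List.length_take]; omega
    rw [List.drop_eq_getElem_cons hlt]
    have ha' : a.toNat < s.length := by omega
    congr 1
    · rw [PySem.List.pyGetD_eq_getElem s d h0 (by omega)]
      exact (List.getElem_take).symm
    · have := map_range_getD s (a + 1) b d (by omega) hb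
      rw [this]
      congr 1
      omega
termination_by (b - a).toNat
decreasing_by omega

theorem card_eq_countP (sub chars : List Char) (hnd : chars.Nodup)
    (hsub : ∀ x ∈ sub, x ∈ chars) :
    (PySem.Set.ofList sub).length = chars.countP (fun c => decide (c ∈ sub)) := by
  rw [List.countP_eq_length_filter]
  apply List.Perm.length_eq
  rw [List.perm_ext_iff_of_nodup (PySem.Set.nodup_ofList sub) (hnd.filter _)]
  intro x
  simp only [PySem.Set.mem_ofList, List.mem_filter, decide_eq_true_eq]
  exact ⟨fun h => ⟨hsub x h, h⟩, fun h => h.2⟩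

theorem perQuery (s : List Char) (a b : Int)
    (h : b < a ∨ (1 ≤ a ∧ b ≤ (s.length : Int))) :
    PySem.Set.len ((PySem.List.pyRange (a - 1) ((b - 1) + 1) 1).foldl
        (fun u i => PySem.Set.add u (PySem.List.pyGetD s i ' ')) PySem.Set.empty)
    = if a - 1 > b - 1 then 0 else
        (((PySem.Set.ofList s).countP (fun c =>
          decide (0 < PySem.List.pyGetD
              (PySem.Dict.getD ((PySem.Set.ofList s).foldl
                  (fun d c => d.insert c (pvPrefix s c)) PySem.Dict.empty) c []) ((b - 1) + 1) 0
            - PySem.List.pyGetD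
              (PySem.Dict.getD ((PySem.Set.ofList s).foldl
                  (fun d c => d.insert c (pvPrefix s c)) PySem.Dict.empty) c []) (a - 1) 0))) : Int) := by
  have hb1 : b - 1 + 1 = b := by ring
  rw [hb1]
  by_cases hba : b < a
  · rw [if_pos (by omega)]
    rw [PySem.List.pyRange_one_eq_nil (by omega)]
    rfl
  · rw [if_neg (by omega)]
    obtain ⟨ha, hbn⟩ : 1 ≤ a ∧ b ≤ (s.length : Int) := by tauto
    -- A side: the set is set(s[a-1 : b])
    rw [← PySem.Set.update_map_eq_foldl_add]
    have hupd : PySem.Set.update PySem.Set.empty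
        ((PySem.List.pyRange (a - 1) b 1).map (fun i => PySem.List.pyGetD s i ' '))
        = PySem.Set.ofList ((PySem.List.pyRange (a - 1) b 1).map (fun i => PySem.List.pyGetD s i ' ')) := by
      exact PySem.Set.update_nil_left _
    rw [hupd, map_range_getD s (a - 1) b ' ' (by omega) hbn]
    set sub := (s.take b.toNat).drop (a - 1).toNat with hsubdef
    -- B side: the prefix lookups count c in s[a-1 : b]
    have htt : List.take (a - 1).toNat (List.take b.toNat s) = List.take (a - 1).toNat s := by
      rw [List.take_take]
      congr 1
      omega
    have hsplit : s.take b.toNat = s.take (a - 1).toNat ++ sub := by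
      conv_lhs => rw [← List.take_append_drop (a - 1).toNat (s.take b.toNat)]
      rw [htt, hsubdef]
    have hpred : ∀ c ∈ PySem.Set.ofList s,
        decide (0 < PySem.List.pyGetD
              (PySem.Dict.getD ((PySem.Set.ofList s).foldl
                  (fun d c => d.insert c (pvPrefix s c)) PySem.Dict.empty) c []) b 0
            - PySem.List.pyGetD
              (PySem.Dict.getD ((PySem.Set.ofList s).foldl
                  (fun d c => d.insert c (pvPrefix s c)) PySem.Dict.empty) c []) (a - 1) 0)
        = decide (c ∈ sub) := by
      intro c hc
      have hlook : PySem.Dict.getD ((PySem.Set.ofList s).foldl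
          (fun d c => d.insert c (pvPrefix s c)) PySem.Dict.empty) c [] = pvPrefix s c := by
        rw [pref_getD_aux, if_pos hc]
      rw [hlook, pvPrefix_eq]
      have hlen : ((List.range (s.length + 1)).map
          (fun j => ((s.take j).count c : Int))).length = s.length + 1 := by simp
      have hget : ∀ (i : Int), 0 ≤ i → i ≤ (s.length : Int) →
          PySem.List.pyGetD ((List.range (s.length + 1)).map
            (fun j => ((s.take j).count c : Int))) i 0 = ((s.take i.toNat).count c : Int) := by
        intro i h0 h1
        rw [PySem.List.pyGetD_eq_getElem _ 0 h0 (by rw [hlen]; omega)]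
        rw [List.getElem_map, List.getElem_range]
      rw [hget b (by omega) hbn, hget (a - 1) (by omega) (by omega)]
      rw [hsplit, List.count_append]
      simp only [decide_eq_decide]
      constructor
      · intro hlt
        have : 0 < sub.count c := by push_cast at hlt; omega
        exact List.count_pos_iff.1 this
      · intro hm
        have : 0 < sub.count c := List.count_pos_iff.2 hm
        push_cast
        omega
    rw [List.countP_congr (fun c hc => by rw [hpred c hc])]
    have hsub : ∀ x ∈ sub, x ∈ PySem.Set.ofList s := by
      intro x hx
      rw [PySem.Set.mem_ofList]
      exact List.mem_of_mem_take (List.mem_of_mem_drop hx)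
    have := card_eq_countP sub (PySem.Set.ofList s) (PySem.Set.nodup_ofList s) hsub
    simp only [PySem.Set.len]
    rw [← this]

theorem pvCharsLoop_aux (s : List Char) : ∀ u : PySem.Set Char,
    s.foldl (fun (st : PySem.Set Char × List Char) ch =>
      if PySem.Set.contains st.1 ch then st else (PySem.Set.add st.1 ch, st.2 ++ [ch])) (u, u)
    = (s.foldl PySem.Set.add u, s.foldl PySem.Set.add u) := by
  induction s with
  | nil => intro u; rfl
  | cons ch s ih =>
    intro u
    simp only [List.foldl_cons]
    by_cases h : ch ∈ u
    · have hc : PySem.Set.contains u ch = true := (PySem.Set.contains_iff u ch).2 h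
      simp only [hc, if_true, PySem.Set.add_of_mem h]
      exact ih u
    · have hc : PySem.Set.contains u ch = false := by
        by_contra hne
        exact h ((PySem.Set.contains_iff u ch).1 (by revert hne; cases PySem.Set.contains u ch <;> simp))
      simp only [hc, if_false, Bool.false_eq_true]
      rw [← PySem.Set.add_of_not_mem h]
      exact ih _

theorem pvCharsLoop_eq (s : List Char) :
    pvCharsLoop s = (PySem.Set.ofList s, PySem.Set.ofList s) := by
  rw [PySem.Set.ofList_eq_foldl, pvCharsLoop]
  exact pvCharsLoop_aux s _

-- ===== VERDICT (by name: the statement is the Claim_ definition above) =====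
theorem SolveQueris_spec : Claim_equal_SolveQueris := by
  intro str Query hdom hpre
  unfold Spec_SolveQueris
  have hA : SolveQueris str Query = [] ++ Query.map (fun query =>
      PySem.Set.len ((PySem.List.pyRange (PySem.List.pyGetD query 0 0 - 1)
          ((PySem.List.pyGetD query 1 0 - 1) + 1) 1).foldl
        (fun u i => PySem.Set.add u (PySem.List.pyGetD str.toList i ' '))
        PySem.Set.empty)) :=
    PySem.List.foldl_append_singleton_eq_map _ Query []
  have hstep : (fun (results : List Int) (q : List Int) =>
      if PySem.List.pyGetD q 0 0 - 1 > PySem.List.pyGetD q 1 0 - 1 then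
        results ++ [0]
      else
        results ++ [(((pvCharsLoop str.toList).2.countP (fun c =>
          decide (0 < PySem.List.pyGetD
              (PySem.Dict.getD ((pvCharsLoop str.toList).2.foldl
                (fun d c => d.insert c (pvPrefix str.toList c)) PySem.Dict.empty) c [])
              ((PySem.List.pyGetD q 1 0 - 1) + 1) 0
            - PySem.List.pyGetD
              (PySem.Dict.getD ((pvCharsLoop str.toList).2.foldl
                (fun d c => d.insert c (pvPrefix str.toList c)) PySem.Dict.empty) c [])
              (PySem.List.pyGetD q 0 0 - 1) 0))) : Int)])
    = (fun (results : List Int) (q : List Int) => results ++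
        [if PySem.List.pyGetD q 0 0 - 1 > PySem.List.pyGetD q 1 0 - 1 then 0
         else (((pvCharsLoop str.toList).2.countP (fun c =>
          decide (0 < PySem.List.pyGetD
              (PySem.Dict.getD ((pvCharsLoop str.toList).2.foldl
                (fun d c => d.insert c (pvPrefix str.toList c)) PySem.Dict.empty) c [])
              ((PySem.List.pyGetD q 1 0 - 1) + 1) 0
            - PySem.List.pyGetD
              (PySem.Dict.getD ((pvCharsLoop str.toList).2.foldl
                (fun d c => d.insert c (pvPrefix str.toList c)) PySem.Dict.empty) c [])
              (PySem.List.pyGetD q 0 0 - 1) 0))) : Int)]) := by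
    funext results q
    split <;> rfl
  have hB : SolveQueris_alt str Query = [] ++ Query.map (fun q =>
        if PySem.List.pyGetD q 0 0 - 1 > PySem.List.pyGetD q 1 0 - 1 then 0
        else (((pvCharsLoop str.toList).2.countP (fun c =>
          decide (0 < PySem.List.pyGetD
              (PySem.Dict.getD ((pvCharsLoop str.toList).2.foldl
                (fun d c => d.insert c (pvPrefix str.toList c)) PySem.Dict.empty) c [])
              ((PySem.List.pyGetD q 1 0 - 1) + 1) 0
            - PySem.List.pyGetD
              (PySem.Dict.getD ((pvCharsLoop str.toList).2.foldl
                (fun d c => d.insert c (pvPrefix str.toList c)) PySem.Dict.empty) c [])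
              (PySem.List.pyGetD q 0 0 - 1) 0))) : Int)) := by
    show Query.foldl _ [] = _
    rw [hstep]
    exact PySem.List.foldl_append_singleton_eq_map _ Query []
  rw [hA, hB, List.nil_append, List.nil_append]
  apply List.map_congr_left
  intro q hq
  obtain ⟨hlen, hcond⟩ := hpre q hq
  rw [pvCharsLoop_eq str.toList]
  exact perQuery str.toList (PySem.List.pyGetD q 0 0) (PySem.List.pyGetD q 1 0) hcond
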